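-- pv_equiv track=rewrite | github.com/gamzeknbrgl/Personal-Projects-Game-Bot | gamebot.py | ocr_to_que
-- ===== SOURCE A (Python) =====
-- def ocr_to_que(question):
--     lines = question.split()
--     question = ''
--     flag = False
--     for line in lines:
--         if not flag:
--             question = question + ' ' + line
--         if '?' in line:
--             flag = True
--     return question
-- ===== SOURCE B (Python) =====
-- def ocr_to_que(question):
--     words = question.split()
--     i = next((k for k, w in enumerate(words) if '?' in w), len(words))
--     kept = words[:i + 1]
--     return ' ' + ' '.join(kept) if kept else ''
-- ===== Notes on version B (the rewrite author's own statement) =====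
-- stated objective: simpler
-- what changed: Replaces A's interleaved flag-and-append loop with index-then-slice-join: find the index of the first word containing a question mark, slice the word list up to and including it, and join once with a leading space.
import Mathlib
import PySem

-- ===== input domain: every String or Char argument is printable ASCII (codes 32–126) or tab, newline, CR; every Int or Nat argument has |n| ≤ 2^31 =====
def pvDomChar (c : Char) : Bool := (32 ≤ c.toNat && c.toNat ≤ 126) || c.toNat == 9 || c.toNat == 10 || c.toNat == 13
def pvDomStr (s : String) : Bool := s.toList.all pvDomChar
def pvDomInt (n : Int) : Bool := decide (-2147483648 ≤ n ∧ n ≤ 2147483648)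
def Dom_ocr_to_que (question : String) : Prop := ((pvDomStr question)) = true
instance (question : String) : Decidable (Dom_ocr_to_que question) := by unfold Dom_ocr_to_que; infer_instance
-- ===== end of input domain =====

-- B replaces A's interleaved flag-and-append loop with find-boundary-then-slice-then-join (objective: simpler).

-- ===== PORT A =====
-- loop body of A: if not flag: question = question + ' ' + line; if '?' in line: flag = True
def pvStepA (st : String × Bool) (line : String) : String × Bool :=
  (if st.2 = false then st.1 ++ " " ++ line else st.1,
   if PySem.Str.isIn "?" line then true else st.2)

def ocr_to_que (question : String) : String :=
  let lines := PySem.Str.split₀ question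
  (lines.foldl pvStepA ("", false)).1

-- ===== PORT B =====
def ocr_to_que_alt (question : String) : String :=
  let words := PySem.Str.split₀ question
  let i := words.findIdx (fun w => PySem.Str.isIn "?" w)
  let kept := words.take (i + 1)
  if kept.isEmpty then "" else " " ++ PySem.Str.join " " kept

-- ===== PRECONDITION & SPEC =====
def Spec_ocr_to_que (question : String) (out : String) : Prop := out = ocr_to_que_alt question
instance (question : String) (out : String) : Decidable (Spec_ocr_to_que question out) := by unfold Spec_ocr_to_que; infer_instance

-- ===== CLAIM (what is proved, stated in full; the proofs are below) =====
def Claim_equal_ocr_to_que : Prop := ∀ (question : String), Dom_ocr_to_que question → Spec_ocr_to_que question (ocr_to_que question)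

-- ===== LEMMAS AND PROOFS =====

theorem pv_join_singleton (w : String) : PySem.Str.join " " [w] = w := by
  apply String.toList_inj.mp
  simp [PySem.Str.toList_join, PySem.Chars.join_singleton]

theorem pv_join_cons (w x : String) (rest : List String) :
    PySem.Str.join " " (w :: x :: rest) = w ++ " " ++ PySem.Str.join " " (x :: rest) := by
  apply String.toList_inj.mp
  simp [PySem.Str.toList_join, PySem.Chars.join_cons_cons]

theorem pv_foldl_true (ws : List String) : ∀ q : String, (ws.foldl pvStepA (q, true)).1 = q := by
  induction ws with
  | nil => intro q; rfl
  | cons w rest ih =>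
      intro q
      simp only [List.foldl_cons, pvStepA]
      simpa using ih _

theorem pv_foldl_false (ws : List String) : ∀ q : String, ws ≠ [] →
    (ws.foldl pvStepA (q, false)).1 =
      q ++ " " ++ PySem.Str.join " " (ws.take (ws.findIdx (fun w => PySem.Str.isIn "?" w) + 1)) := by
  induction ws with
  | nil => intro q h; exact absurd rfl h
  | cons w rest ih =>
      intro q _
      simp only [List.foldl_cons, pvStepA, List.findIdx_cons]
      by_cases hp : PySem.Str.isIn "?" w = true
      · rw [hp]
        simp only [if_true, cond_true, List.take_succ_cons, List.take_zero,
          pv_join_singleton, pv_foldl_true]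
      · have hpf : PySem.Str.isIn "?" w = false := by simpa using hp
        rw [hpf]
        simp only [Bool.false_eq_true, if_false, cond_false, if_true]
        cases rest with
        | nil => simp [List.findIdx_nil, pv_join_singleton]
        | cons x rs =>
            rw [ih (q ++ " " ++ w) (by simp)]
            have hne : (x :: rs).take ((x :: rs).findIdx (fun w => PySem.Str.isIn "?" w) + 1) ≠ [] := by
              simp [List.take_succ_cons]
            obtain ⟨y, ys, hy⟩ := List.exists_cons_of_ne_nil hne
            simp only [List.take_succ_cons, hy, pv_join_cons]
            simp [String.append_assoc]

-- ===== VERDICT (by name: the statement is the Claim_ definition above) =====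
theorem ocr_to_que_spec : Claim_equal_ocr_to_que := by
  intro question _
  unfold Spec_ocr_to_que ocr_to_que ocr_to_que_alt
  cases hws : PySem.Str.split₀ question with
  | nil => rfl
  | cons w rest =>
      rw [pv_foldl_false (w :: rest) "" (by simp)]
      simp [List.take_succ_cons]
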